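-- pv_equiv track=rewrite | github.com/syedsaif666/LGTM | scripts/auto-sync.py | is_source_file
-- ===== SOURCE A (Python) =====
-- SOURCE_DIRS = ["agents", "skills", "scripts", "rules"]
--
-- SOURCE_FILES = ["AGENTS.md", "settings.json"]
--
-- def is_source_file(relpath):
--     normalized = relpath.replace("\\", "/")
--
--     if normalized in SOURCE_FILES:
--         return True
--
--     for d in SOURCE_DIRS:
--         if normalized.startswith(d + "/"):
--             return True
--
--     return False
-- ===== SOURCE B (Python) =====
-- SOURCE_DIRS = {"agents", "skills", "scripts", "rules"}
--
-- SOURCE_FILES = {"AGENTS.md", "settings.json"}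
--
--
-- def is_source_file(relpath):
--     normalized = relpath.replace("\\", "/")
--
--     if normalized in SOURCE_FILES:
--         return True
--
--     head, sep, _ = normalized.partition("/")
--     return sep != "" and head in SOURCE_DIRS
-- ===== Notes on version B (the rewrite author's own statement) =====
-- stated objective: idiomatic
-- what changed: Replaces the loop over SOURCE_DIRS testing a directory-prefix match by a single partition of the path at its first separator and one set lookup on the leading segment (requiring that a separator actually occurs).
import Mathlib
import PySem

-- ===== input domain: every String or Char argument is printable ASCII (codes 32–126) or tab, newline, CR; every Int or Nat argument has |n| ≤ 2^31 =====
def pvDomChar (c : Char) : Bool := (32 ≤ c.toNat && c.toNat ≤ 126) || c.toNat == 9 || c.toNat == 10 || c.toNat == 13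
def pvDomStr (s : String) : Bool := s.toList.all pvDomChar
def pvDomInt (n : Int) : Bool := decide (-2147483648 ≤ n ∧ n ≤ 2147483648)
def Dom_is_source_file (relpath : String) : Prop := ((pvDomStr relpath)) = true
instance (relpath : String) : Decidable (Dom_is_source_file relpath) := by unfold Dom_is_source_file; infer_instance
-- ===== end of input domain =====

-- B replaces the loop over SOURCE_DIRS testing startswith(d + "/") by one partition of the
-- path at its first '/' and a set lookup on the leading segment (idiomatic, same cost class).


-- ===== PORT A =====
def SOURCE_DIRS : List String := ["agents", "skills", "scripts", "rules"]

def SOURCE_FILES : List String := ["AGENTS.md", "settings.json"]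

def is_source_file (relpath : String) : Bool :=
  let normalized := PySem.Str.replace relpath "\\" "/"
  if SOURCE_FILES.contains normalized then true
  else SOURCE_DIRS.any (fun d => PySem.Str.startswith normalized (d ++ "/"))

-- ===== PORT B =====
-- Python sets of strings, held as lists of their distinct elements (over List Char).
def srcDirsAlt : List (List Char) :=
  ["agents".toList, "skills".toList, "scripts".toList, "rules".toList]

def srcFilesAlt : List (List Char) := ["AGENTS.md".toList, "settings.json".toList]

-- str.partition("/") by hand (exact): head = chars before the first '/', sep ≠ "" iff '/' occurs.
def headSeg (cs : List Char) : List Char := cs.takeWhile (fun c => !(c == '/'))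

def is_source_file_alt (relpath : String) : Bool :=
  let cs := PySem.Chars.replace relpath.toList "\\".toList "/".toList
  if srcFilesAlt.contains cs then true
  else cs.contains '/' && srcDirsAlt.contains (headSeg cs)

-- ===== PRECONDITION & SPEC =====
def Spec_is_source_file (relpath : String) (out : Bool) : Prop := out = is_source_file_alt relpath
instance (relpath : String) (out : Bool) : Decidable (Spec_is_source_file relpath out) := by unfold Spec_is_source_file; infer_instance

-- ===== CLAIM (what is proved, stated in full; the proofs are below) =====
def Claim_equal_is_source_file : Prop := ∀ (relpath : String), Dom_is_source_file relpath → Spec_is_source_file relpath (is_source_file relpath)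

-- ===== LEMMAS AND PROOFS =====

-- For a directory name d containing no '/', "d/" is a prefix of cs iff cs contains a '/'
-- and the segment of cs before its first '/' is exactly d.
theorem prefix_slash_iff (d cs : List Char) (hd : '/' ∉ d) :
    (d ++ ['/']) <+: cs ↔ ('/' ∈ cs ∧ headSeg cs = d) := by
  induction d generalizing cs with
  | nil =>
    cases cs with
    | nil => simp [headSeg]
    | cons c t =>
      by_cases hc : c = '/'
      · simp [headSeg, List.cons_prefix_cons, hc]
      · simp only [List.nil_append, headSeg, List.takeWhile_cons]
        simp [List.cons_prefix_cons, hc]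
        exact fun h => hc h.symm
  | cons a d ih =>
    have ha : a ≠ '/' := fun h => hd (h ▸ List.mem_cons_self)
    have hd' : '/' ∉ d := fun h => hd (List.mem_cons_of_mem _ h)
    cases cs with
    | nil => simp [headSeg]
    | cons c t =>
      by_cases hc : c = a
      · subst hc
        simp only [headSeg, List.takeWhile_cons] at ih ⊢
        simp [List.cons_prefix_cons, ha, ih t hd']
        intro _ h
        exact absurd h.symm ha
      · constructor
        · intro h
          exact absurd (List.cons_prefix_cons.mp h).1 fun h' => hc h'.symm
        · rintro ⟨-, htw⟩
          exfalso
          by_cases hcs : c = '/' <;> simp [headSeg, hcs] at htw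
          · exact hc htw.1
        
theorem startswith_seg (cs d : List Char) (hd : '/' ∉ d) :
    PySem.Chars.startswith cs (d ++ ['/']) = (cs.contains '/' && (headSeg cs == d)) := by
  rcases hb : PySem.Chars.startswith cs (d ++ ['/']) with _ | _
  · have hp : ¬ (d ++ ['/']) <+: cs := fun h' => by
      simp [(PySem.Chars.startswith_iff _ _).mpr h'] at hb
    rw [prefix_slash_iff d cs hd] at hp
    by_cases hm : '/' ∈ cs
    · have hne : headSeg cs ≠ d := fun h' => hp ⟨hm, h'⟩
      simp [hm, hne]
    · simp [hm]
  · obtain ⟨hm, he⟩ := (prefix_slash_iff d cs hd).mp ((PySem.Chars.startswith_iff _ _).mp hb)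
    simp [hm, he]

theorem core_eq (n : String) :
    (SOURCE_DIRS.any (fun d => PySem.Str.startswith n (d ++ "/"))) =
      (n.toList.contains '/' && srcDirsAlt.contains (headSeg n.toList)) := by
  have h : ∀ d : String, ("/" : String).toList = ['/'] → '/' ∉ d.toList →
      PySem.Str.startswith n (d ++ "/") = (n.toList.contains '/' && (headSeg n.toList == d.toList)) := by
    intro d h1 h2
    rw [PySem.Str.startswith_eq, String.toList_append, h1, startswith_seg _ _ h2]
  simp only [SOURCE_DIRS, List.any_cons, List.any_nil]
  rw [h "agents" (by decide) (by decide), h "skills" (by decide) (by decide),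
      h "scripts" (by decide) (by decide), h "rules" (by decide) (by decide)]
  simp only [srcDirsAlt, List.contains_cons, List.contains_nil]
  cases n.toList.contains '/' <;> simp

theorem file_memb (n : String) :
    (SOURCE_FILES.contains n) = (srcFilesAlt.contains n.toList) := by
  have hfiles : ∀ t : String, (n == t) = (n.toList == t.toList) := by
    intro t
    rcases Bool.eq_false_or_eq_true (n == t) with h | h <;>
      simp_all [← String.toList_inj]
  simp only [SOURCE_FILES, srcFilesAlt, List.contains_cons, List.contains_nil, hfiles]

-- ===== VERDICT (by name: the statement is the Claim_ definition above) =====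
theorem is_source_file_spec : Claim_equal_is_source_file := by
  intro relpath _
  show is_source_file relpath = is_source_file_alt relpath
  simp only [is_source_file, is_source_file_alt, ← PySem.Str.toList_replace, file_memb, core_eq]
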